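-- pv_equiv track=rewrite | github.com/XuanjieLiu/S3Plus | queryLearn/query_vis.py | operation_table_grid
-- ===== SOURCE A (Python) =====
-- def operation_cell_text(cell):
--     if cell['add'] and cell['mul']:
--         return '+/*m'
--     if cell['add']:
--         return '+'
--     if cell['mul']:
--         return '*m'
--     return '?'
--
-- def operation_table_grid(rows, cols, cells):
--     text_grid = []
--     color_grid = []
--     color_idx = {
--         '?': 0,
--         '+': 1,
--         '*m': 2,
--         '+/*m': 3,
--     }
--     for row in rows:
--         text_row = []
--         color_row = []
--         for col in cols:
--             text = operation_cell_text(cells.get((row, col), {'add': False, 'mul': False}))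
--             text_row.append(text)
--             color_row.append(color_idx[text])
--         text_grid.append(text_row)
--         color_grid.append(color_row)
--     return text_grid, color_grid
-- ===== SOURCE B (Python) =====
-- def operation_table_grid(rows, cols, cells):
--     texts = ['?', '+', '*m', '+/*m']
--     # start from the all-default grid, then patch only the positions that have an entry
--     color_grid = [[0] * len(cols) for _ in rows]
--     for (r, c), cell in cells.items():
--         positions = [(i, j)
--                      for i, rv in enumerate(rows) if rv == r
--                      for j, cv in enumerate(cols) if cv == c]
--         if positions:
--             code = (1 if cell['add'] else 0) + 2 * (1 if cell['mul'] else 0)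
--             for i, j in positions:
--                 color_grid[i][j] = code
--     text_grid = [[texts[k] for k in row] for row in color_grid]
--     return text_grid, color_grid
-- ===== Notes on version B (the rewrite author's own statement) =====
-- stated objective: alternative
-- what changed: B inverts the traversal: instead of scanning rows x cols and looking each cell up, it starts from the all-default grid ('?'/0 everywhere) and iterates over the cells dict once, patching every grid position whose (row, col) coordinates match the entry's key; the text grid is then derived from the finished color grid by table indexing.
import Mathlib
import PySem

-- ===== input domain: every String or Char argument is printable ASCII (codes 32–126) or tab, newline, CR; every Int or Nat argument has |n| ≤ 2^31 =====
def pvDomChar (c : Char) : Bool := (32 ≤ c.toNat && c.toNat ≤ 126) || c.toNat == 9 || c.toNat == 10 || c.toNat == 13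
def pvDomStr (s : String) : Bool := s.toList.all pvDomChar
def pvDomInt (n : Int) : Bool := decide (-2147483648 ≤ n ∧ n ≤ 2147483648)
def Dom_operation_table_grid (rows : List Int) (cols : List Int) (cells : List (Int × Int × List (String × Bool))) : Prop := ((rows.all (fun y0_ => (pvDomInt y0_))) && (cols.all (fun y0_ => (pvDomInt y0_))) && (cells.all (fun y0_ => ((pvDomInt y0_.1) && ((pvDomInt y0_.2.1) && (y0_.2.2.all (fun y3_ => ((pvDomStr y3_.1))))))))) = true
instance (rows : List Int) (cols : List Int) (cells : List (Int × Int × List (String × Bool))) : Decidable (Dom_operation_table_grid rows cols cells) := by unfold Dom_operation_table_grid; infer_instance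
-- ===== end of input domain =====

-- B inverts the traversal (alternative decomposition): start from the all-default grid and
-- patch it by iterating over the cells dict once, then derive the text grid from the color grid.

-- shared helper: Python's cell['<k>'] on a str->bool dict (exact under Pre_, which guarantees the key exists)
def lookupB (d : List (String × Bool)) (k : String) : Bool :=
  ((d.find? (fun p => p.1 == k)).map (fun p => p.2)).getD false

-- ===== PORT A =====
-- cells.get((row, col), {'add': False, 'mul': False})  (first match = Python dict, keys unique under Pre_)
def getCell (cells : List (Int × Int × List (String × Bool))) (row col : Int) : List (String × Bool) :=
  ((cells.find? (fun e => e.1 == row && e.2.1 == col)).map (fun e => e.2.2)).getD [("add", false), ("mul", false)]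

def operation_cell_text (cell : List (String × Bool)) : String :=
  if lookupB cell "add" && lookupB cell "mul" then "+/*m"
  else if lookupB cell "add" then "+"
  else if lookupB cell "mul" then "*m"
  else "?"

def operation_table_grid (rows : List Int) (cols : List Int) (cells : List (Int × Int × List (String × Bool))) : List (List String) × List (List Int) :=
  let color_idx : List (String × Int) := [("?", 0), ("+", 1), ("*m", 2), ("+/*m", 3)]
  rows.foldl (fun (g : List (List String) × List (List Int)) row =>
    let inner := cols.foldl (fun (r : List String × List Int) col =>
      let text := operation_cell_text (getCell cells row col)
      -- color_idx[text]: text is always one of the four keys, so getD 0 is exact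
      (r.1 ++ [text], r.2 ++ [(((color_idx.find? (fun p => p.1 == text)).map (fun p => p.2)).getD 0)]))
      ([], [])
    (g.1 ++ [inner.1], g.2 ++ [inner.2])) ([], [])

-- ===== PORT B =====
def opCellCode (cell : List (String × Bool)) : Int :=
  (if lookupB cell "add" then 1 else 0) + 2 * (if lookupB cell "mul" then 1 else 0)

-- the list comprehension over enumerate(rows) × enumerate(cols)
def cellPositions (rows cols : List Int) (r c : Int) : List (Nat × Nat) :=
  rows.zipIdx.flatMap (fun p =>
    if p.1 == r then cols.zipIdx.filterMap (fun q => if q.1 == c then some (p.2, q.2) else none)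
    else [])

def operation_table_grid_alt (rows : List Int) (cols : List Int) (cells : List (Int × Int × List (String × Bool))) : List (List String) × List (List Int) :=
  let texts : List String := ["?", "+", "*m", "+/*m"]
  let init : List (List Int) := rows.map (fun _ => cols.map (fun _ => (0 : Int)))
  let color_grid := cells.foldl (fun g e =>
    let ps := cellPositions rows cols e.1 e.2.1
    if ps.isEmpty then g
    else
      let code := opCellCode e.2.2
      ps.foldl (fun g' p => g'.modify p.1 (fun row => row.set p.2 code)) g) init
  -- texts[k]: k is always in 0..3, so getD is exact
  let text_grid := color_grid.map (fun row => row.map (fun k => texts.getD k.toNat "?"))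
  (text_grid, color_grid)

-- ===== PRECONDITION & SPEC =====
-- Pre_ excludes (a) inputs where some cell dict actually looked up (its key lies in rows × cols) is
-- missing the 'add' or 'mul' key: there Python A raises KeyError (and so does B); and (b) association
-- lists with duplicate (row, col) keys, which no Python dict can represent (an artifact of the encoding).
def Pre_operation_table_grid (rows : List Int) (cols : List Int) (cells : List (Int × Int × List (String × Bool))) : Prop :=
  (cells.all (fun e => !(rows.contains e.1 && cols.contains e.2.1) ||
      (e.2.2.any (fun p => p.1 == "add") && e.2.2.any (fun p => p.1 == "mul")))) = true ∧
  (cells.map (fun e => (e.1, e.2.1))).Nodup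
instance (rows : List Int) (cols : List Int) (cells : List (Int × Int × List (String × Bool))) : Decidable (Pre_operation_table_grid rows cols cells) := by unfold Pre_operation_table_grid; infer_instance

def pvWitness_operation_table_grid : List Int × List Int × (List (Int × Int × List (String × Bool))) :=
  ([1, 2], [3], [(1, 3, [("add", true), ("mul", false)]), (2, 3, [("add", true), ("mul", true)])])

def Spec_operation_table_grid (rows : List Int) (cols : List Int) (cells : List (Int × Int × List (String × Bool))) (out : List (List String) × List (List Int)) : Prop := out = operation_table_grid_alt rows cols cells
instance (rows : List Int) (cols : List Int) (cells : List (Int × Int × List (String × Bool))) (out : List (List String) × List (List Int)) : Decidable (Spec_operation_table_grid rows cols cells out) := by unfold Spec_operation_table_grid; infer_instance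

-- ===== CLAIM (what is proved, stated in full; the proofs are below) =====
def Claim_equal_operation_table_grid : Prop := ∀ (rows : List Int) (cols : List Int) (cells : List (Int × Int × List (String × Bool))), Dom_operation_table_grid rows cols cells → Pre_operation_table_grid rows cols cells → Spec_operation_table_grid rows cols cells (operation_table_grid rows cols cells)


-- ===== LEMMAS AND PROOFS =====

-- the value of grid g at position (i, j), as an Option
def g2 (g : List (List Int)) (i j : Nat) : Option Int := g[i]?.bind (fun row => row[j]?)

-- B's per-entry update step (the lambda inside operation_table_grid_alt's fold)
def stepB (rows cols : List Int) (g : List (List Int)) (e : Int × Int × List (String × Bool)) : List (List Int) :=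
  let ps := cellPositions rows cols e.1 e.2.1
  if ps.isEmpty then g
  else
    let code := opCellCode e.2.2
    ps.foldl (fun g' p => g'.modify p.1 (fun row => row.set p.2 code)) g

theorem g2_patch (g : List (List Int)) (code : Int) (p : Nat × Nat) (i j : Nat) :
    g2 (g.modify p.1 (fun row => row.set p.2 code)) i j =
      if p = (i, j) ∧ (g2 g i j).isSome then some code else g2 g i j := by
  unfold g2
  rw [List.getElem?_modify]
  by_cases h1 : p.1 = i
  · cases hg : g[i]? with
    | none => simp [h1]
    | some row =>
      simp only [h1, Option.bind_some]
      by_cases h2 : p.2 = j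
      · by_cases hj : p.2 < row.length
        · have hj' : j < row.length := h2 ▸ hj
          have hjs : row[j]?.isSome = true := by
            rw [List.getElem?_eq_getElem hj']; rfl
          simp [h2, hj', Prod.ext_iff, h1]
        · have hjs : row[j]? = none := List.getElem?_eq_none (by omega)
          simp [h2, show ¬ j < row.length by omega]
      · have hne : ¬(p = (i, j)) := by
          intro h; exact h2 (congrArg Prod.snd h)
        simp [h2, hne]
  · have hne : ¬(p = (i, j)) := by
      intro h; exact h1 (congrArg Prod.fst h)
    simp [h1, hne]

theorem g2_patchFold (code : Int) : ∀ (ps : List (Nat × Nat)) (g : List (List Int)) (i j : Nat),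
    g2 (ps.foldl (fun g' p => g'.modify p.1 (fun row => row.set p.2 code)) g) i j =
      if (i, j) ∈ ps ∧ (g2 g i j).isSome then some code else g2 g i j := by
  intro ps
  induction ps with
  | nil => intro g i j; simp
  | cons p ps ih =>
    intro g i j
    rw [List.foldl_cons, ih]
    rw [g2_patch]
    rcases eq_or_ne p (i, j) with hp | hp <;>
      by_cases hs : (g2 g i j).isSome = true <;>
      by_cases hm : (i, j) ∈ ps <;>
      simp [hp, hs, hm]
    all_goals (intro h; exact absurd h.symm hp)

theorem mapLen_patch (g : List (List Int)) (code : Int) (p : Nat × Nat) :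
    (g.modify p.1 (fun row => row.set p.2 code)).map List.length = g.map List.length := by
  apply List.ext_getElem?
  intro n
  simp only [List.getElem?_map, List.getElem?_modify]
  cases g[n]? with
  | none => rfl
  | some row =>
    simp only [Option.map_some]
    split <;> simp [List.length_set]

theorem mapLen_patchFold (code : Int) : ∀ (ps : List (Nat × Nat)) (g : List (List Int)),
    (ps.foldl (fun g' p => g'.modify p.1 (fun row => row.set p.2 code)) g).map List.length =
      g.map List.length := by
  intro ps
  induction ps with
  | nil => intro g; rfl
  | cons p ps ih => intro g; rw [List.foldl_cons, ih, mapLen_patch]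

theorem mapLen_stepB (rows cols : List Int) (g : List (List Int)) (e : Int × Int × List (String × Bool)) :
    (stepB rows cols g e).map List.length = g.map List.length := by
  unfold stepB
  by_cases h : (cellPositions rows cols e.1 e.2.1).isEmpty <;>
    simp [h, mapLen_patchFold]

theorem mapLen_foldB (rows cols : List Int) :
    ∀ (cells : List (Int × Int × List (String × Bool))) (g : List (List Int)),
    (cells.foldl (stepB rows cols) g).map List.length = g.map List.length := by
  intro cells
  induction cells with
  | nil => intro g; rfl
  | cons e es ih => intro g; rw [List.foldl_cons, ih, mapLen_stepB]

-- shape: g has a row of length |cols| at every i < |rows|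
theorem g2_isSome_of_shape {rows cols : List Int} {g : List (List Int)}
    (hshape : g.map List.length = rows.map (fun _ => cols.length))
    {i j : Nat} (hi : i < rows.length) (hj : j < cols.length) :
    (g2 g i j).isSome = true := by
  have h1 : (g.map List.length)[i]? = some cols.length := by
    rw [hshape, List.getElem?_map, List.getElem?_eq_getElem hi]; rfl
  rw [List.getElem?_map] at h1
  cases hg : g[i]? with
  | none => rw [hg] at h1; simp at h1
  | some row =>
    rw [hg] at h1
    simp only [Option.map_some, Option.some.injEq] at h1
    unfold g2
    rw [hg, Option.bind_some, List.getElem?_eq_getElem (by omega : j < row.length)]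
    rfl

theorem mem_cellPositions {rows cols : List Int} {r c : Int} {i j : Nat} :
    (i, j) ∈ cellPositions rows cols r c ↔
      ((∃ h : i < rows.length, rows[i] = r) ∧ (∃ h : j < cols.length, cols[j] = c)) := by
  unfold cellPositions
  rw [List.mem_flatMap]
  constructor
  · rintro ⟨p, hp, hpi⟩
    by_cases hpr : p.1 == r
    · rw [if_pos hpr, List.mem_filterMap] at hpi
      obtain ⟨q, hq, hqc⟩ := hpi
      by_cases hqc' : q.1 == c
      · rw [if_pos hqc'] at hqc
        simp only [Option.some.injEq, Prod.mk.injEq] at hqc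
        obtain ⟨hqi, hqj⟩ := hqc
        have hp' : rows[i]? = some p.1 := by rw [← hqi]; exact List.mem_zipIdx_iff_getElem?.mp hp
        have hq' : cols[j]? = some q.1 := by rw [← hqj]; exact List.mem_zipIdx_iff_getElem?.mp hq
        have hi : i < rows.length := by
          by_contra h; rw [List.getElem?_eq_none (by omega)] at hp'; simp at hp'
        have hj : j < cols.length := by
          by_contra h; rw [List.getElem?_eq_none (by omega)] at hq'; simp at hq'
        refine ⟨⟨hi, ?_⟩, ⟨hj, ?_⟩⟩
        · have h2 : rows[i] = p.1 := by
            rw [List.getElem?_eq_getElem hi] at hp'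
            exact Option.some.inj hp'
          rw [h2]; exact eq_of_beq hpr
        · have h2 : cols[j] = q.1 := by
            rw [List.getElem?_eq_getElem hj] at hq'
            exact Option.some.inj hq'
          rw [h2]; exact eq_of_beq hqc'
      · rw [if_neg hqc'] at hqc; simp at hqc
    · rw [if_neg hpr] at hpi; simp at hpi
  · rintro ⟨⟨hi, hr⟩, ⟨hj, hc⟩⟩
    refine ⟨(rows[i], i), List.mem_zipIdx_iff_getElem?.mpr (by rw [List.getElem?_eq_getElem hi]), ?_⟩
    rw [if_pos (by simp [hr])]
    rw [List.mem_filterMap]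
    exact ⟨(cols[j], j), List.mem_zipIdx_iff_getElem?.mpr (by rw [List.getElem?_eq_getElem hj]),
      by rw [if_pos (by simp [hc])]⟩

theorem g2_stepB {rows cols : List Int} {g : List (List Int)}
    (hshape : g.map List.length = rows.map (fun _ => cols.length))
    (e : Int × Int × List (String × Bool)) {i j : Nat} (hi : i < rows.length) (hj : j < cols.length) :
    g2 (stepB rows cols g e) i j =
      if rows[i] = e.1 ∧ cols[j] = e.2.1 then some (opCellCode e.2.2) else g2 g i j := by
  have hmem : ((i, j) ∈ cellPositions rows cols e.1 e.2.1) ↔ (rows[i] = e.1 ∧ cols[j] = e.2.1) := by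
    rw [mem_cellPositions]
    constructor
    · rintro ⟨⟨_, h1⟩, ⟨_, h2⟩⟩; exact ⟨h1, h2⟩
    · rintro ⟨h1, h2⟩; exact ⟨⟨hi, h1⟩, ⟨hj, h2⟩⟩
  have hsome := g2_isSome_of_shape hshape hi hj
  unfold stepB
  by_cases hemp : (cellPositions rows cols e.1 e.2.1).isEmpty = true
  · rw [if_pos hemp]
    have hnot : ¬(rows[i] = e.1 ∧ cols[j] = e.2.1) := by
      intro h
      have := hmem.mpr h
      rw [List.isEmpty_iff.mp hemp] at this
      simp at this
    rw [if_neg hnot]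
  · rw [if_neg hemp]
    rw [g2_patchFold]
    by_cases hc : rows[i] = e.1 ∧ cols[j] = e.2.1
    · rw [if_pos ⟨hmem.mpr hc, hsome⟩, if_pos hc]
    · rw [if_neg (fun h => hc (hmem.mp h.1)), if_neg hc]

theorem g2_foldB (rows cols : List Int) :
    ∀ (cells : List (Int × Int × List (String × Bool))) (g : List (List Int)),
    g.map List.length = rows.map (fun _ => cols.length) →
    ∀ (i j : Nat) (hi : i < rows.length) (hj : j < cols.length),
    g2 (cells.foldl (stepB rows cols) g) i j =
      match cells.reverse.find? (fun e => e.1 == rows[i]'hi && e.2.1 == cols[j]'hj) with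
      | some e => some (opCellCode e.2.2)
      | none => g2 g i j := by
  intro cells
  induction cells with
  | nil => intro g _ i j hi hj; simp
  | cons e es ih =>
    intro g hshape i j hi hj
    rw [List.foldl_cons]
    have hshape' : (stepB rows cols g e).map List.length = rows.map (fun _ => cols.length) := by
      rw [mapLen_stepB, hshape]
    rw [ih (stepB rows cols g e) hshape' i j hi hj]
    rw [List.reverse_cons, List.find?_append]
    cases hfind : es.reverse.find? (fun e' => e'.1 == rows[i] && e'.2.1 == cols[j]) with
    | some x => simp
    | none =>
      simp only [Option.none_or]
      rw [g2_stepB hshape e hi hj]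
      by_cases hc : rows[i] = e.1 ∧ cols[j] = e.2.1
      · rw [if_pos hc]
        have hb : (e.1 == rows[i] && e.2.1 == cols[j]) = true := by
          simp [hc.1.symm, hc.2.symm]
        simp [hb]
      · rw [if_neg hc]
        have hb : (e.1 == rows[i] && e.2.1 == cols[j]) = false := by
          by_contra h
          simp only [Bool.not_eq_false, Bool.and_eq_true, beq_iff_eq] at h
          exact hc ⟨h.1.symm, h.2.symm⟩
        simp [hb]

-- with unique keys, the last match equals the first match
theorem find?_reverse_key : ∀ (l : List (Int × Int × List (String × Bool))) (r c : Int),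
    (l.map (fun e => (e.1, e.2.1))).Nodup →
    l.reverse.find? (fun e => e.1 == r && e.2.1 == c) = l.find? (fun e => e.1 == r && e.2.1 == c) := by
  intro l
  induction l with
  | nil => intro r c _; rfl
  | cons x xs ih =>
    intro r c hnd
    rw [List.map_cons, List.nodup_cons] at hnd
    obtain ⟨hnotin, hnd'⟩ := hnd
    rw [List.reverse_cons, List.find?_append, ih r c hnd']
    by_cases hpx : (x.1 == r && x.2.1 == c) = true
    · have hrx : x.1 = r ∧ x.2.1 = c := by
        simp only [Bool.and_eq_true, beq_iff_eq] at hpx; exact hpx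
      have hxsnone : xs.find? (fun e => e.1 == r && e.2.1 == c) = none := by
        rw [List.find?_eq_none]
        intro y hy hpy
        simp only [Bool.and_eq_true, beq_iff_eq] at hpy
        apply hnotin
        rw [List.mem_map]
        exact ⟨y, hy, by rw [hpy.1, hpy.2, hrx.1, hrx.2]⟩
      rw [hxsnone]
      simp [hpx]
    · rw [List.find?_cons_of_neg (by simpa using hpx)]
      simp [Option.or_none]
      rw [List.find?_cons_of_neg (by simpa using hpx)]

-- per-cell correspondence: A's text and color against B's code
theorem cell_text_code (cell : List (String × Bool)) :
    operation_cell_text cell = (["?", "+", "*m", "+/*m"] : List String).getD (opCellCode cell).toNat "?" ∧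
    ((([("?", 0), ("+", 1), ("*m", 2), ("+/*m", 3)] : List (String × Int)).find?
        (fun p => p.1 == operation_cell_text cell)).map (fun p => p.2)).getD 0 = opCellCode cell := by
  cases hadd : lookupB cell "add" <;> cases hmul : lookupB cell "mul" <;>
    simp [operation_cell_text, opCellCode, hadd, hmul]

theorem opCellCode_default : opCellCode [("add", false), ("mul", false)] = 0 := by decide

-- the shape of B's initial grid
theorem shape_init (rows cols : List Int) :
    (rows.map (fun _ => cols.map (fun _ => (0 : Int)))).map List.length = rows.map (fun _ => cols.length) := by
  simp

-- B's color grid is A's per-cell code grid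
theorem colorB_eq (rows cols : List Int) (cells : List (Int × Int × List (String × Bool)))
    (hnodup : (cells.map (fun e => (e.1, e.2.1))).Nodup) :
    cells.foldl (stepB rows cols) (rows.map (fun _ => cols.map (fun _ => (0 : Int)))) =
      rows.map (fun row => cols.map (fun col => opCellCode (getCell cells row col))) := by
  set F := cells.foldl (stepB rows cols) (rows.map (fun _ => cols.map (fun _ => (0 : Int)))) with hF
  have hshape := shape_init rows cols
  have hmap : F.map List.length = rows.map (fun _ => cols.length) := by
    rw [hF, mapLen_foldB rows cols cells _, hshape]
  have hlenF : F.length = rows.length := by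
    have h := congrArg List.length hmap
    simpa using h
  apply List.ext_getElem?
  intro i
  by_cases hi : i < rows.length
  · have hFi : ∃ rowB, F[i]? = some rowB := by
      rw [List.getElem?_eq_getElem (by omega : i < F.length)]
      exact ⟨_, rfl⟩
    obtain ⟨rowB, hrowB⟩ := hFi
    have hTi : (rows.map (fun row => cols.map (fun col => opCellCode (getCell cells row col))))[i]? =
        some (cols.map (fun col => opCellCode (getCell cells rows[i] col))) := by
      rw [List.getElem?_map, List.getElem?_eq_getElem hi]; rfl
    have hrowBlen : rowB.length = cols.length := by
      have h1 : (F.map List.length)[i]? = some rowB.length := by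
        rw [List.getElem?_map, hrowB]; rfl
      rw [hmap, List.getElem?_map, List.getElem?_eq_getElem hi] at h1
      simpa using h1.symm
    rw [hrowB, hTi]
    congr 1
    apply List.ext_getElem?
    intro j
    by_cases hj : j < cols.length
    · have hg2 : g2 F i j = rowB[j]? := by
        unfold g2; rw [hrowB]; rfl
      have hchar := g2_foldB rows cols cells _ (shape_init rows cols) i j hi hj
      rw [← hF] at hchar
      rw [find?_reverse_key cells rows[i] cols[j] hnodup] at hchar
      have hmapj : (cols.map (fun col => opCellCode (getCell cells rows[i] col)))[j]? =
          some (opCellCode (getCell cells rows[i] cols[j])) := by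
        rw [List.getElem?_map, List.getElem?_eq_getElem hj]; rfl
      rw [← hg2, hchar, hmapj]
      cases hfind : cells.find? (fun e => e.1 == rows[i] && e.2.1 == cols[j]) with
      | some e =>
        simp only [getCell, hfind, Option.map_some, Option.getD_some]
      | none =>
        simp only [getCell, hfind, Option.map_none, Option.getD_none, opCellCode_default]
        unfold g2
        rw [List.getElem?_map, List.getElem?_eq_getElem hi, Option.map_some, Option.bind_some]
        simp [hj]
    · rw [List.getElem?_eq_none (by omega : rowB.length ≤ j),
        List.getElem?_eq_none (by simp only [List.length_map]; omega)]
  · rw [List.getElem?_eq_none (by omega : F.length ≤ i),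
      List.getElem?_eq_none (by simp only [List.length_map]; omega)]

-- ===== VERDICT (by name: the statement is the Claim_ definition above) =====
theorem operation_table_grid_spec : Claim_equal_operation_table_grid := by
  intro rows cols cells _ hpre
  unfold Spec_operation_table_grid
  simp only [operation_table_grid, operation_table_grid_alt]
  rw [show (fun (g : List (List Int)) (e : Int × Int × List (String × Bool)) =>
      let ps := cellPositions rows cols e.1 e.2.1
      if ps.isEmpty then g
      else
        let code := opCellCode e.2.2
        ps.foldl (fun g' p => g'.modify p.1 (fun row => row.set p.2 code)) g) = stepB rows cols from rfl]
  rw [colorB_eq rows cols cells hpre.2]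
  rw [PySem.List.foldl_prod_mk
    (fun (s : List (List String)) row => s ++ [(cols.foldl (fun (r : List String × List Int) col =>
        (r.1 ++ [operation_cell_text (getCell cells row col)],
         r.2 ++ [((([("?", 0), ("+", 1), ("*m", 2), ("+/*m", 3)] : List (String × Int)).find?
            (fun p => p.1 == operation_cell_text (getCell cells row col))).map (fun p => p.2)).getD 0]))
        ([], [])).1])
    (fun (s : List (List Int)) row => s ++ [(cols.foldl (fun (r : List String × List Int) col =>
        (r.1 ++ [operation_cell_text (getCell cells row col)],
         r.2 ++ [((([("?", 0), ("+", 1), ("*m", 2), ("+/*m", 3)] : List (String × Int)).find?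
            (fun p => p.1 == operation_cell_text (getCell cells row col))).map (fun p => p.2)).getD 0]))
        ([], [])).2])]
  rw [PySem.List.foldl_append_singleton_eq_map, PySem.List.foldl_append_singleton_eq_map]
  simp only [List.nil_append, List.map_map]
  refine Prod.ext ?_ ?_ <;> simp only <;>
    refine List.map_congr_left (fun row _ => ?_)
  · rw [PySem.List.foldl_prod_mk
      (fun (s : List String) col => s ++ [operation_cell_text (getCell cells row col)])
      (fun (s : List Int) col => s ++ [((([("?", 0), ("+", 1), ("*m", 2), ("+/*m", 3)] : List (String × Int)).find?
          (fun p => p.1 == operation_cell_text (getCell cells row col))).map (fun p => p.2)).getD 0])]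
    simp only [PySem.List.foldl_append_singleton_eq_map, List.nil_append, List.map_map, Function.comp]
    exact List.map_congr_left (fun col _ => (cell_text_code (getCell cells row col)).1)
  · rw [PySem.List.foldl_prod_mk
      (fun (s : List String) col => s ++ [operation_cell_text (getCell cells row col)])
      (fun (s : List Int) col => s ++ [((([("?", 0), ("+", 1), ("*m", 2), ("+/*m", 3)] : List (String × Int)).find?
          (fun p => p.1 == operation_cell_text (getCell cells row col))).map (fun p => p.2)).getD 0])]
    simp only [PySem.List.foldl_append_singleton_eq_map, List.nil_append]
    exact List.map_congr_left (fun col _ => (cell_text_code (getCell cells row col)).2)
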